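-- pv_equiv track=rewrite | github.com/drot27-max/2025A-TP2 | Exercice5.py | categoriser_commentaires
-- ===== SOURCE A (Python) =====
-- def analyser_commentaire(commentaire, mots_cles):
--     score_total = 5  # Base neutre
--     mots_trouves = []
--
--     commentaire_lower = commentaire.lower()
--
--     for char in '.,!?;:()[]{}"\'-':
--         commentaire_lower = commentaire_lower.replace(char, ' ')
--     mots_commentaire = commentaire_lower.split()
--
--     # Recherche des mots-clés
--     for mot, valeur in mots_cles.items():
--         for mot_c in mots_commentaire:
--             if mot_c == mot or mot_c.startswith(mot):
--                 score_total += valeur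
--                 mots_trouves.append(mot)
--                 break  # éviter double comptage du même mot
--
--     # Borner entre 0 et 10
--     score_total = max(0, min(10, score_total))
--
--     return score_total, mots_trouves
--
-- def categoriser_commentaires(liste_commentaires, mots_cles):
--     categories = {'positifs': [], 'neutres': [], 'negatifs': []}
--
--     for commentaire in liste_commentaires:
--         score, mots = analyser_commentaire(commentaire, mots_cles)
--         if score >= 7:
--             categories['positifs'].append((commentaire, score))
--         elif score >= 4:
--             categories['neutres'].append((commentaire, score))
--         else:
--             categories['negatifs'].append((commentaire, score))
--
--     return categories
-- ===== SOURCE B (Python) =====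
-- PONCTUATION = '.,!?;:()[]{}"\'-'
--
-- def _mots(commentaire):
--     # one pass: turn punctuation into spaces, then split on whitespace
--     nettoye = ''.join(' ' if ch in PONCTUATION else ch for ch in commentaire.lower())
--     return nettoye.split()
--
-- def _score(commentaire, mots_cles):
--     mots = _mots(commentaire)
--     # hash set of every prefix of every word: keyword matches iff it is in the set
--     prefixes = set()
--     for mot in mots:
--         for i in range(len(mot) + 1):
--             prefixes.add(mot[:i])
--     score = 5 + sum(valeur for mot, valeur in mots_cles.items() if mot in prefixes)
--     return max(0, min(10, score))
--
-- def categoriser_commentaires(liste_commentaires, mots_cles):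
--     scored = [(c, _score(c, mots_cles)) for c in liste_commentaires]
--     return {'positifs': [(c, s) for c, s in scored if s >= 7],
--             'neutres': [(c, s) for c, s in scored if 4 <= s < 7],
--             'negatifs': [(c, s) for c, s in scored if s < 4]}
-- ===== Notes on version B (the rewrite author's own statement) =====
-- stated objective: faster
-- what changed: Per comment, B cleans punctuation in one pass instead of 13 sequential replace passes, builds a hash set of every prefix of every word once so each keyword is a single set lookup instead of a scan over all words, and buckets results with three filters over a scored list instead of appending into a dict inside the loop.
import Mathlib
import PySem

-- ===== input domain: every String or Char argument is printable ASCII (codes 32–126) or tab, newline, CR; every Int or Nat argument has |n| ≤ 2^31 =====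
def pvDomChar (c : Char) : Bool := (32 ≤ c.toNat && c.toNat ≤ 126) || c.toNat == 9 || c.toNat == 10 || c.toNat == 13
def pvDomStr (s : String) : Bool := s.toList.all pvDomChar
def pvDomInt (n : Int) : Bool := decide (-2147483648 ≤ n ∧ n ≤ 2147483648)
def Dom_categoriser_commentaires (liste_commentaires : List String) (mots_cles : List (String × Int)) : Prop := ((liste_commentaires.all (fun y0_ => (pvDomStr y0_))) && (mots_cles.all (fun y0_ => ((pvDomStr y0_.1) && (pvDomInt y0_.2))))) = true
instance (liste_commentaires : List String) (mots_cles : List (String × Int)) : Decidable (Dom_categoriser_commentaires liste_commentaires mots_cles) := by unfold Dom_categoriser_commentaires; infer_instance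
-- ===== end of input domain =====

-- B replaces A's per-keyword scan over the comment's words by a prefix set built once per comment
-- (keyword matches iff it is a prefix of some word), a one-pass punctuation translation, and three
-- filters instead of the dict-append loop; same return value (a fresh dict is returned, no mutation).

-- ===== PORT A =====
-- the punctuation string '.,!?;:()[]{}"\'-' iterated over by A
def pvPunct : List Char := ".,!?;:()[]{}\"'-".toList

-- inner 'for mot_c in mots_commentaire: if …: break' loop of analyser_commentaire
def pvInnerA (mot : String) (mots : List String) : Bool :=
  match mots with
  | [] => false
  | w :: ws => if w == mot || PySem.Str.startswith w mot then true else pvInnerA mot ws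

def analyser_commentaire (commentaire : String) (mots_cles : List (String × Int)) : Int × List String :=
  let commentaire_lower :=
    pvPunct.foldl (fun acc c => PySem.Str.replace acc (String.ofList [c]) " ")
      (PySem.Str.lower commentaire)
  let mots_commentaire := PySem.Str.split₀ commentaire_lower
  -- 'for mot, valeur in mots_cles.items(): …' — score/mots accumulated left to right
  let st := (PySem.Dict.ofList mots_cles).items.foldl
      (fun (st : Int × List String) mv =>
        if pvInnerA mv.1 mots_commentaire then (st.1 + mv.2, st.2 ++ [mv.1]) else st)
      ((5 : Int), ([] : List String))
  (max 0 (min 10 st.1), st.2)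

def categoriser_commentaires (liste_commentaires : List String) (mots_cles : List (String × Int)) : List (String × List (String × Int)) :=
  let categories : PySem.Dict String (List (String × Int)) :=
    PySem.Dict.ofList [("positifs", []), ("neutres", []), ("negatifs", [])]
  -- categories['…'].append(x) on an always-present key = Dict.modify '…' [] (· ++ [x])
  (liste_commentaires.foldl
    (fun d commentaire =>
      let r := analyser_commentaire commentaire mots_cles
      if r.1 ≥ 7 then d.modify "positifs" [] (· ++ [(commentaire, r.1)])
      else if r.1 ≥ 4 then d.modify "neutres" [] (· ++ [(commentaire, r.1)])
      else d.modify "negatifs" [] (· ++ [(commentaire, r.1)]))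
    categories).items

-- ===== PORT B =====
def pvPonctuation : List Char := ".,!?;:()[]{}\"'-".toList

-- ''.join(' ' if ch in PONCTUATION else ch for ch in commentaire.lower()).split()
def pvMotsB (commentaire : String) : List String :=
  PySem.Str.split₀ (String.ofList
    ((PySem.Str.lower commentaire).toList.map
      (fun ch => if pvPonctuation.contains ch then ' ' else ch)))

-- set of every prefix mot[:i], 0 ≤ i ≤ len(mot), of every word
def pvPrefixes (mots : List String) : PySem.Set String :=
  PySem.Set.ofList (mots.flatMap
    (fun mot => (PySem.List.pyRange 0 (PySem.Str.len mot + 1) 1).map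
      (fun i => PySem.Str.slice mot none (some i))))

def pvScoreB (commentaire : String) (mots_cles : List (String × Int)) : Int :=
  let prefixes := pvPrefixes (pvMotsB commentaire)
  let score : Int := 5 +
    (((PySem.Dict.ofList mots_cles).items.filter
        (fun mv => PySem.Set.contains prefixes mv.1)).map (fun mv => mv.2)).sum
  max 0 (min 10 score)

def categoriser_commentaires_alt (liste_commentaires : List String) (mots_cles : List (String × Int)) : List (String × List (String × Int)) :=
  let scored := liste_commentaires.map (fun c => (c, pvScoreB c mots_cles))
  [("positifs", scored.filter (fun p => decide (7 ≤ p.2))),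
   ("neutres", scored.filter (fun p => decide (4 ≤ p.2) && decide (p.2 < 7))),
   ("negatifs", scored.filter (fun p => decide (p.2 < 4)))]

-- ===== PRECONDITION & SPEC =====
def Spec_categoriser_commentaires (liste_commentaires : List String) (mots_cles : List (String × Int)) (out : List (String × List (String × Int))) : Prop := out = categoriser_commentaires_alt liste_commentaires mots_cles
instance (liste_commentaires : List String) (mots_cles : List (String × Int)) (out : List (String × List (String × Int))) : Decidable (Spec_categoriser_commentaires liste_commentaires mots_cles out) := by unfold Spec_categoriser_commentaires; infer_instance

-- ===== CLAIM (what is proved, stated in full; the proofs are below) =====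
def Claim_equal_categoriser_commentaires : Prop := ∀ (liste_commentaires : List String) (mots_cles : List (String × Int)), Dom_categoriser_commentaires liste_commentaires mots_cles → Spec_categoriser_commentaires liste_commentaires mots_cles (categoriser_commentaires liste_commentaires mots_cles)

-- ===== LEMMAS AND PROOFS =====

-- replacing one character (≠ the replacement itself does not matter) is a map
theorem pv_go_single (c : Char) : ∀ (fuel : Nat) (l acc : List Char), l.length ≤ fuel →
    PySem.Chars.replace.go [c] [' '] fuel l acc
      = acc.reverse ++ l.map (fun x => if x = c then ' ' else x) := by
  intro fuel
  induction fuel with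
  | zero => intro l acc h
            have : l = [] := List.eq_nil_of_length_eq_zero (Nat.le_zero.mp h)
            subst this; simp [PySem.Chars.replace.go]
  | succ n ih =>
    intro l acc h
    cases l with
    | nil => simp [PySem.Chars.replace.go]
    | cons x t =>
      rw [PySem.Chars.replace.go]
      by_cases hx : x = c
      · subst hx
        have hp : List.isPrefixOf [x] (x :: t) = true := by simp [List.isPrefixOf]
        simp only [hp, if_pos, List.length_cons, List.length_nil, List.drop_succ_cons,
          List.drop_zero, List.reverse_cons, List.reverse_nil, List.nil_append]
        rw [ih t _ (by simpa using Nat.le_of_succ_le_succ h)]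
        simp
      · have hp : List.isPrefixOf [c] (x :: t) = false := by
          simp [List.isPrefixOf]; exact fun hh => absurd hh.symm hx
        simp only [hp, Bool.false_eq_true, if_false]
        rw [ih t _ (by simpa using Nat.le_of_succ_le_succ h)]
        simp [hx]

theorem pv_replace_single (c : Char) (s : List Char) :
    PySem.Chars.replace s [c] [' '] = s.map (fun x => if x = c then ' ' else x) := by
  rw [PySem.Chars.replace]
  simp only [List.isEmpty]
  exact pv_go_single c s.length s [] (le_refl _)

-- the chain of single-character replaces is one map
theorem pv_clean_eq (ps : List Char) : ∀ (s : String),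
    (ps.foldl (fun acc c => PySem.Str.replace acc (String.ofList [c]) " ") s).toList
      = s.toList.map (fun x => if ps.contains x then ' ' else x) := by
  induction ps with
  | nil => intro s; simp
  | cons c ps ih =>
    intro s
    rw [List.foldl_cons, ih]
    rw [PySem.Str.toList_replace]
    have h1 : (String.ofList [c]).toList = [c] := by simp
    have h2 : (" " : String).toList = [' '] := by decide
    rw [h1, h2, pv_replace_single, List.map_map]
    apply List.map_congr_left
    intro x hx
    simp only [Function.comp]
    by_cases hxc : x = c
    · subst hxc; simp
    · simp [hxc]

-- A's word list equals B's word list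
theorem pv_mots_eq (commentaire : String) :
    PySem.Str.split₀ (pvPunct.foldl (fun acc c => PySem.Str.replace acc (String.ofList [c]) " ")
      (PySem.Str.lower commentaire)) = pvMotsB commentaire := by
  unfold pvMotsB PySem.Str.split₀
  rw [pv_clean_eq]
  simp [pvPunct, pvPonctuation]

-- A's inner break-loop decides exactly membership in B's prefix set
theorem pv_innerA_iff (mot : String) : ∀ mots, pvInnerA mot mots = true ↔
    ∃ w ∈ mots, mot.toList <+: w.toList := by
  intro mots
  induction mots with
  | nil => simp [pvInnerA]
  | cons w ws ih =>
    have hcond : (w == mot || PySem.Str.startswith w mot) = true ↔ mot.toList <+: w.toList := by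
      simp only [Bool.or_eq_true, beq_iff_eq, PySem.Str.startswith_eq, PySem.Chars.startswith_iff]
      constructor
      · rintro (rfl | h)
        · exact List.prefix_refl _
        · exact h
      · exact Or.inr
    simp only [pvInnerA]
    by_cases h : (w == mot || PySem.Str.startswith w mot) = true
    · simp only [h, if_true]
      simp only [true_iff, List.mem_cons]
      exact ⟨w, Or.inl rfl, hcond.mp h⟩
    · rw [if_neg h, ih]
      simp only [List.mem_cons]
      constructor
      · rintro ⟨v, hv, hp⟩; exact ⟨v, Or.inr hv, hp⟩
      · rintro ⟨v, (rfl | hv), hp⟩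
        · exact absurd (hcond.mpr hp) h
        · exact ⟨v, hv, hp⟩

theorem pv_prefix_mem_iff (mot w : String) :
    (mot ∈ (PySem.List.pyRange 0 (PySem.Str.len w + 1) 1).map
      (fun i => PySem.Str.slice w none (some i))) ↔ mot.toList <+: w.toList := by
  simp only [List.mem_map, PySem.List.mem_pyRange_one]
  constructor
  · rintro ⟨i, ⟨h0, hlt⟩, rfl⟩
    have : (PySem.Str.slice w none (some i)).toList = w.toList.take i.toNat := by
      simp [PySem.Str.toList_slice, PySem.Chars.slice_eq_listSlice, PySem.List.slice_to _ h0]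
    rw [this]
    exact List.take_prefix _ _
  · intro h
    refine ⟨(mot.toList.length : Int), ⟨Int.natCast_nonneg _, ?_⟩, ?_⟩
    · have := h.length_le
      have hlen : PySem.Str.len w = (w.toList.length : Int) := by simp [PySem.Str.len_eq]
      omega
    · rw [← String.toList_inj]
      have : (PySem.Str.slice w none (some (mot.toList.length : Int))).toList
          = w.toList.take mot.toList.length := by
        simp [PySem.Str.toList_slice, PySem.Chars.slice_eq_listSlice,
          PySem.List.slice_to _ (Int.natCast_nonneg _)]
      rw [this, ← List.prefix_iff_eq_take.mp h]

-- A's inner break-loop decides exactly membership in B's prefix set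
theorem pv_match_eq (mot : String) (mots : List String) :
    pvInnerA mot mots = PySem.Set.contains (pvPrefixes mots) mot := by
  rw [Bool.eq_iff_iff, pv_innerA_iff]
  unfold pvPrefixes
  rw [show ∀ (s : PySem.Set String) x, PySem.Set.contains s x = List.contains s x from fun _ _ => rfl]
  rw [List.contains_iff_mem, PySem.Set.mem_ofList, List.mem_flatMap]
  constructor
  · rintro ⟨w, hw, hp⟩; exact ⟨w, hw, (pv_prefix_mem_iff mot w).mpr hp⟩
  · rintro ⟨w, hw, hp⟩; exact ⟨w, hw, (pv_prefix_mem_iff mot w).mp hp⟩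

-- first component of A's keyword fold = base + sum of values of the keywords the predicate accepts
theorem pv_fold_score (p : String × Int → Bool) (items : List (String × Int)) :
    ∀ (a : Int) (l : List String),
    (items.foldl (fun (st : Int × List String) mv =>
        if p mv then (st.1 + mv.2, st.2 ++ [mv.1]) else st) (a, l)).1
      = a + ((items.filter p).map (fun mv => mv.2)).sum := by
  induction items with
  | nil => intro a l; simp
  | cons mv rest ih =>
    intro a l
    simp only [List.foldl_cons, List.filter_cons]
    by_cases h : p mv
    · rw [if_pos h, if_pos h, ih]
      simp only [List.map_cons, List.sum_cons]
      omega
    · rw [if_neg h, if_neg h, ih]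

theorem pv_score_eq (c : String) (m : List (String × Int)) :
    (analyser_commentaire c m).1 = pvScoreB c m := by
  unfold analyser_commentaire pvScoreB
  dsimp only
  rw [pv_mots_eq]
  rw [pv_fold_score (fun mv => pvInnerA mv.1 (pvMotsB c)) (PySem.Dict.ofList m).items 5 []]
  simp only [pv_match_eq]

-- the category loop over the three-key dict = three filters
theorem pv_catloop (f : String → Int) : ∀ (cs : List String) (p n g : List (String × Int)),
    (cs.foldl
      (fun d c =>
        if f c ≥ 7 then d.modify "positifs" [] (· ++ [(c, f c)])
        else if f c ≥ 4 then d.modify "neutres" [] (· ++ [(c, f c)])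
        else d.modify "negatifs" [] (· ++ [(c, f c)]))
      (PySem.Dict.mk [("positifs", p), ("neutres", n), ("negatifs", g)])).items
    = [("positifs", p ++ (cs.map (fun c => (c, f c))).filter (fun q => decide (7 ≤ q.2))),
       ("neutres", n ++ (cs.map (fun c => (c, f c))).filter (fun q => decide (4 ≤ q.2) && decide (q.2 < 7))),
       ("negatifs", g ++ (cs.map (fun c => (c, f c))).filter (fun q => decide (q.2 < 4)))] := by
  have hpos : ∀ (p n g : List (String × Int)) (h : List (String × Int) → List (String × Int)),
      (PySem.Dict.mk [("positifs", p), ("neutres", n), ("negatifs", g)]).modify "positifs" [] h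
        = PySem.Dict.mk [("positifs", h p), ("neutres", n), ("negatifs", g)] := fun _ _ _ _ => rfl
  have hneu : ∀ (p n g : List (String × Int)) (h : List (String × Int) → List (String × Int)),
      (PySem.Dict.mk [("positifs", p), ("neutres", n), ("negatifs", g)]).modify "neutres" [] h
        = PySem.Dict.mk [("positifs", p), ("neutres", h n), ("negatifs", g)] := fun _ _ _ _ => rfl
  have hneg : ∀ (p n g : List (String × Int)) (h : List (String × Int) → List (String × Int)),
      (PySem.Dict.mk [("positifs", p), ("neutres", n), ("negatifs", g)]).modify "negatifs" [] h
        = PySem.Dict.mk [("positifs", p), ("neutres", n), ("negatifs", h g)] := fun _ _ _ _ => rfl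
  intro cs
  induction cs with
  | nil => intro p n g; simp
  | cons c cs ih =>
    intro p n g
    simp only [List.foldl_cons, List.map_cons, List.filter_cons]
    by_cases h7 : f c ≥ 7
    · rw [if_pos h7, hpos, ih]
      have h4 : ¬ (f c < 7) := by omega
      have h0 : ¬ (f c < 4) := by omega
      simp [h7, h4, h0]
    · rw [if_neg h7]
      by_cases h4 : f c ≥ 4
      · rw [if_pos h4, hneu, ih]
        have ha : ¬ (7 ≤ f c) := by omega
        have hb : f c < 7 := by omega
        have h0 : ¬ (f c < 4) := by omega
        simp [h4, ha, hb, h0]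
      · rw [if_neg h4, hneg, ih]
        have ha : ¬ (7 ≤ f c) := by omega
        have hb : ¬ (4 ≤ f c) := by omega
        have h0 : f c < 4 := by omega
        simp [ha, hb, h0]

-- ===== VERDICT (by name: the statement is the Claim_ definition above) =====
theorem categoriser_commentaires_spec : Claim_equal_categoriser_commentaires := by
  intro l m _
  unfold Spec_categoriser_commentaires categoriser_commentaires categoriser_commentaires_alt
  dsimp only
  rw [show PySem.Dict.ofList [("positifs", ([] : List (String × Int))), ("neutres", []), ("negatifs", [])]
      = PySem.Dict.mk [("positifs", []), ("neutres", []), ("negatifs", [])] from rfl]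
  rw [pv_catloop (fun c => (analyser_commentaire c m).1) l [] [] []]
  simp only [pv_score_eq, List.nil_append]
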